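-- pv_equiv track=rewrite | github.com/MrBrantCode/unitest_baseline | mut_generate/mist_train_cf/cf_45909/solution.py | calc_aggregate
-- ===== SOURCE A (Python) =====
-- def calc_aggregate(num):
--     # Function to check if number is prime
--     def is_prime(n):
--         if n <= 1:
--             return False
--         if n <= 3:
--             return True
--         if n % 2 == 0 or n % 3 == 0:
--             return False
--         i = 5
--         while i * i <= n:
--             if n % i == 0 or n % (i + 2) == 0:
--                 return False
--             i += 6
--         return True
--
--     # Function to check if number is Fibonacci
--     def is_fibonacci(n):
--         x = 0
--         y = 1
--         while y < n:
--             z = x + y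
--             x = y
--             y = z
--         return y == n
--
--     # List to hold prime and Fibonacci prime numbers
--     primes = []
--     fib_primes = []
--
--     # Check each number up to specified number
--     for i in range(2, num):
--         if is_prime(i):
--             primes.append(i)
--             if is_fibonacci(i):
--                 fib_primes.append(i)
--
--     # Calculate sum of prime numbers and Fibonacci primes
--     prime_sum = sum(primes)
--     fib_prime_sum = sum(fib_primes)
--
--     return prime_sum, fib_prime_sum
-- ===== SOURCE B (Python) =====
-- def calc_aggregate(num):
--     # Sieve of Eratosthenes replaces per-number trial division; a precomputed
--     # set of Fibonacci numbers below num replaces the per-prime Fibonacci loop.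
--     n = num if num > 2 else 2
--     sieve = [True] * n
--     sieve[0] = False
--     sieve[1] = False
--     p = 2
--     while p * p < n:
--         if sieve[p]:
--             for m in range(p * p, n, p):
--                 sieve[m] = False
--         p += 1
--     fibs = set()
--     a, b = 2, 3
--     while a < num:
--         fibs.add(a)
--         a, b = b, a + b
--     prime_sum = 0
--     fib_prime_sum = 0
--     for i in range(2, num):
--         if sieve[i]:
--             prime_sum += i
--             if i in fibs:
--                 fib_prime_sum += i
--     return prime_sum, fib_prime_sum
-- ===== Notes on version B (the rewrite author's own statement) =====
-- stated objective: faster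
-- what changed: B replaces A's per-number 6k±1 trial-division primality test by a single Sieve of Eratosthenes over [0, num), and A's per-prime Fibonacci-generation loop by one precomputed set of the Fibonacci numbers below num, accumulating the two sums directly instead of building lists.
import Mathlib
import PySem

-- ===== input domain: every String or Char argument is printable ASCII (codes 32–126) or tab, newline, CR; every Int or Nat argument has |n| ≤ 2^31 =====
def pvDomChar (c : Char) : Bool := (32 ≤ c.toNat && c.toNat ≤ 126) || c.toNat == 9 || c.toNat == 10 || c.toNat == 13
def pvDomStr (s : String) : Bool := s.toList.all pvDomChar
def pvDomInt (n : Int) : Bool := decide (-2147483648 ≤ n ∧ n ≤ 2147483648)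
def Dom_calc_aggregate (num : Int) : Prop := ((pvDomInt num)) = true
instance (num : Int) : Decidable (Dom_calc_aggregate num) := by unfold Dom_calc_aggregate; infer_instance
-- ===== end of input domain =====

-- B replaces A's per-number 6k±1 trial division by a Sieve of Eratosthenes and A's
-- per-prime Fibonacci loop by one precomputed set of Fibonacci numbers below num
-- (objective: faster). Loops are ported with a fuel argument large enough for every
-- admitted input (the equivalence proof shows the fuel suffices); neither version
-- mutates its argument.

-- ===== PORT A =====
-- the `while i * i <= n` loop of A's is_prime (i steps by 6); fuel bounds the
-- iteration count, the zero-fuel value is never reached at the call site's fuel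
def pvATrial (n : Int) : Nat → Int → Bool
  | 0, _i => true
  | fuel + 1, i =>
    if i * i ≤ n then
      if PySem.Int.mod n i == 0 || PySem.Int.mod n (i + 2) == 0 then false
      else pvATrial n fuel (i + 6)
    else true

-- A's is_prime
def pvAIsPrime (n : Int) : Bool :=
  if n ≤ 1 then false
  else if n ≤ 3 then true
  else if PySem.Int.mod n 2 == 0 || PySem.Int.mod n 3 == 0 then false
  else pvATrial n (n + 1).toNat 5

-- the `while y < n` loop of A's is_fibonacci
def pvAFibLoop (n : Int) : Nat → Nat → Nat → Bool
  | 0, _x, y => ((y : Int) == n)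
  | fuel + 1, x, y => if (y : Int) < n then pvAFibLoop n fuel y (x + y) else ((y : Int) == n)

-- A's is_fibonacci, started at (0, 1)
def pvAIsFib (n : Int) : Bool := pvAFibLoop n (n.toNat + 2) 0 1

def calc_aggregate (num : Int) : List Int :=
  let r := (PySem.List.pyRange 2 num 1).foldl
    (fun (s : List Int × List Int) i =>
      if pvAIsPrime i then
        (s.1 ++ [i], if pvAIsFib i then s.2 ++ [i] else s.2)
      else s) ([], [])
  [r.1.sum, r.2.sum]

-- ===== PORT B =====
-- inner `for m in range(p*p, n, p): sieve[m] = False`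
def pvBMark (n p : Int) (s : List Bool) : List Bool :=
  (PySem.List.pyRange (p * p) n p).foldl (fun t m => PySem.List.pySetD t m false) s

-- outer `while p * p < n` sieving loop (fuel as above)
def pvBSieveLoop (n : Int) : Nat → Int → List Bool → List Bool
  | 0, _p, s => s
  | fuel + 1, p, s =>
    if p * p < n then
      pvBSieveLoop n fuel (p + 1) (if PySem.List.pyGetD s p false then pvBMark n p s else s)
    else s

-- `while a < num: fibs.add(a); a, b = b, a + b` (fuel as above)
def pvBFibLoop (num : Int) : Nat → PySem.Set Int → Nat → Nat → PySem.Set Int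
  | 0, fibs, _a, _b => fibs
  | fuel + 1, fibs, a, b =>
    if (a : Int) < num then pvBFibLoop num fuel (PySem.Set.add fibs (a : Int)) b (a + b)
    else fibs

def calc_aggregate_alt (num : Int) : List Int :=
  let n : Int := if num > 2 then num else 2
  let sieve0 := PySem.List.pySetD (PySem.List.pySetD (List.replicate n.toNat true) 0 false) 1 false
  let sieve := pvBSieveLoop n n.toNat 2 sieve0
  let fibs := pvBFibLoop num (num.toNat + 1) PySem.Set.empty 2 3
  let r := (PySem.List.pyRange 2 num 1).foldl
    (fun (s : Int × Int) i =>
      if PySem.List.pyGetD sieve i false then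
        (s.1 + i, if PySem.Set.contains fibs i then s.2 + i else s.2)
      else s) (0, 0)
  [r.1, r.2]

-- ===== PRECONDITION & SPEC =====
def Spec_calc_aggregate (num : Int) (out : List Int) : Prop := out = calc_aggregate_alt num
instance (num : Int) (out : List Int) : Decidable (Spec_calc_aggregate num out) := by unfold Spec_calc_aggregate; infer_instance

-- ===== CLAIM (what is proved, stated in full; the proofs are below) =====
def Claim_equal_calc_aggregate : Prop := ∀ (num : Int), Dom_calc_aggregate num → Spec_calc_aggregate num (calc_aggregate num)

-- ===== LEMMAS AND PROOFS =====

-- "j has a divisor q with q*q ≤ j": both prime tests decide exactly the negation of this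
def SmallFacN (j : Nat) : Prop := ∃ q : Nat, 2 ≤ q ∧ q * q ≤ j ∧ q ∣ j

def HasSmallFacZ (n : Int) : Prop := ∃ d : Int, 2 ≤ d ∧ d * d ≤ n ∧ d ∣ n

lemma smallfac_cast (j : Nat) : HasSmallFacZ (j : Int) ↔ SmallFacN j := by
  constructor
  · rintro ⟨d, hd2, hdd, hdvd⟩
    refine ⟨d.toNat, by omega, ?_, ?_⟩
    · have hd : ((d.toNat : Int)) = d := Int.toNat_of_nonneg (by omega)
      zify
      rw [hd]; exact hdd
    · have hd : ((d.toNat : Int)) = d := Int.toNat_of_nonneg (by omega)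
      rw [← hd] at hdvd
      exact_mod_cast hdvd
  · rintro ⟨q, hq2, hqq, hdvd⟩
    exact ⟨(q : Int), by exact_mod_cast hq2, by exact_mod_cast hqq, by exact_mod_cast hdvd⟩

-- ---- A's trial-division loop ----

lemma noFac_of_checked (n i : Int) (h0i : 0 ≤ i) (hii : ¬ i * i ≤ n)
    (H : ∀ d : Int, 2 ≤ d → d < i → ¬ d ∣ n) : ¬ HasSmallFacZ n := by
  rintro ⟨d, hd2, hdd, hdvd⟩
  have hdi : d < i := by nlinarith
  exact H d hd2 hdi hdvd

lemma trial_key (n : Int) (h5n : 5 ≤ n) (h2 : ¬ (2:Int) ∣ n) (h3 : ¬ (3:Int) ∣ n) :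
    ∀ (fuel : Nat) (i : Int), (n + 1 - i).toNat ≤ fuel → 5 ≤ i → i % 6 = 5 →
    (∀ d : Int, 2 ≤ d → d < i → ¬ d ∣ n) →
    (pvATrial n fuel i = true ↔ ¬ HasSmallFacZ n) := by
  intro fuel
  induction fuel with
  | zero =>
    intro i hf h5 _ H
    have hni : n < i := by omega
    have hii : ¬ i * i ≤ n := by nlinarith
    simp only [pvATrial, true_iff]
    exact noFac_of_checked n i (by omega) hii H
  | succ f ih =>
    intro i hf h5 hm H
    by_cases hii : i * i ≤ n
    · rw [pvATrial, if_pos hii]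
      by_cases hdi : (i ∣ n) ∨ ((i + 2) ∣ n)
      · have hcond : (PySem.Int.mod n i == 0 || PySem.Int.mod n (i + 2) == 0) = true := by
          rcases hdi with h | h
          · simp [(PySem.Int.mod_eq_zero_iff_dvd n i).mpr h]
          · simp [(PySem.Int.mod_eq_zero_iff_dvd n (i + 2)).mpr h]
        simp only [hcond, if_true, Bool.false_eq_true, false_iff, not_not]
        rcases hdi with h | h
        · exact ⟨i, by omega, hii, h⟩
        · by_cases hq : (i + 2) * (i + 2) ≤ n
          · exact ⟨i + 2, by omega, hq, h⟩
          · obtain ⟨k, hk⟩ := h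
            refine ⟨k, ?_, ?_, Dvd.intro_left _ hk.symm⟩
            · nlinarith
            · nlinarith
      · push_neg at hdi
        have hcond : (PySem.Int.mod n i == 0 || PySem.Int.mod n (i + 2) == 0) = false := by
          simp [PySem.Int.mod_eq_zero_iff_dvd, hdi.1, hdi.2]
        simp only [hcond, Bool.false_eq_true, if_false]
        apply ih (i + 6) (by omega) (by omega) (by omega)
        intro d hd2 hdi6 hdvd
        have hcases : d < i ∨ d = i ∨ d = i + 1 ∨ d = i + 2 ∨ d = i + 3 ∨ d = i + 4 ∨ d = i + 5 := by
          omega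
        rcases hcases with hc | hc | hc | hc | hc | hc | hc
        · exact H d hd2 hc hdvd
        · exact hdi.1 (hc ▸ hdvd)
        · exact h2 (dvd_trans (show (2:Int) ∣ d by omega) hdvd)
        · exact hdi.2 (hc ▸ hdvd)
        · exact h2 (dvd_trans (show (2:Int) ∣ d by omega) hdvd)
        · exact h3 (dvd_trans (show (3:Int) ∣ d by omega) hdvd)
        · exact h2 (dvd_trans (show (2:Int) ∣ d by omega) hdvd)
    · rw [pvATrial, if_neg hii]
      simp only [true_iff]
      exact noFac_of_checked n i (by omega) hii H

lemma pvAIsPrime_iff (n : Int) (hn : 2 ≤ n) :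
    (pvAIsPrime n = true ↔ ¬ HasSmallFacZ n) := by
  unfold pvAIsPrime
  rw [if_neg (by omega : ¬ n ≤ 1)]
  by_cases h3le : n ≤ 3
  · rw [if_pos h3le]
    simp only [true_iff]
    rintro ⟨d, hd2, hdd, -⟩
    nlinarith
  · rw [if_neg h3le]
    by_cases hd2 : (2:Int) ∣ n
    · have hcond2 : (PySem.Int.mod n 2 == 0 || PySem.Int.mod n 3 == 0) = true := by
        simp only [Bool.or_eq_true, beq_iff_eq, PySem.Int.mod_eq_zero_iff_dvd]
        exact Or.inl hd2
      simp only [hcond2, if_true, Bool.false_eq_true, false_iff, not_not]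
      exact ⟨2, by omega, by omega, hd2⟩
    · by_cases hd3 : (3:Int) ∣ n
      · have h9 : 9 ≤ n := by omega
        have hcond : (PySem.Int.mod n 2 == 0 || PySem.Int.mod n 3 == 0) = true := by
          simp only [Bool.or_eq_true, beq_iff_eq, PySem.Int.mod_eq_zero_iff_dvd]
          exact Or.inr hd3
        simp only [hcond, if_true, Bool.false_eq_true, false_iff, not_not]
        exact ⟨3, by omega, by omega, hd3⟩
      · have hcond : (PySem.Int.mod n 2 == 0 || PySem.Int.mod n 3 == 0) = false := by
          simp [PySem.Int.mod_eq_zero_iff_dvd, hd2, hd3]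
        simp only [hcond, Bool.false_eq_true, if_false]
        have h5n : 5 ≤ n := by omega
        apply trial_key n h5n hd2 hd3 (n + 1).toNat 5 (by omega) (by omega) (by omega)
        intro d hd hdlt hdvd
        have : d = 2 ∨ d = 3 ∨ d = 4 := by omega
        rcases this with hc | hc | hc
        · exact hd2 (hc ▸ hdvd)
        · exact hd3 (hc ▸ hdvd)
        · exact hd2 (dvd_trans (by omega : (2:Int) ∣ d) (hc ▸ hdvd))

-- ---- B's sieve ----

lemma bool_ext {a b : Bool} (h : a = true ↔ b = true) : a = b := Bool.coe_iff_coe.mp h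

lemma pyGetD_nonneg_getD (xs : List Bool) (i : Int) (h : 0 ≤ i) :
    PySem.List.pyGetD xs i false = xs.getD i.toNat false := by
  simp [PySem.List.pyGetD, PySem.List.pyGet?_of_nonneg _ h, List.getD_eq_getElem?_getD]

lemma foldl_pySetD_getD (L : List Int) : ∀ (s : List Bool) (j : Nat), (∀ m ∈ L, 0 ≤ m) →
    (L.foldl (fun t m => PySem.List.pySetD t m false) s).getD j false
      = if (j : Int) ∈ L then false else s.getD j false := by
  induction L with
  | nil => intro s j _; simp
  | cons m L ih =>
    intro s j hL
    have hm0 : 0 ≤ m := hL m (by simp)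
    simp only [List.foldl_cons]
    rw [ih _ _ (fun x hx => hL x (by simp [hx]))]
    rw [PySem.List.pySetD_of_nonneg _ _ hm0]
    by_cases hmemL : (j : Int) ∈ L
    · simp [hmemL]
    · by_cases hjm : (j : Int) = m
      · have hj : m.toNat = j := by omega
        subst hj
        simp only [List.mem_cons, hjm, true_or, if_true, if_neg hmemL]
        simp only [List.getD_eq_getElem?_getD, List.getElem?_set]
        by_cases hlen : m.toNat < s.length <;> simp [hlen]
      · have hne : m.toNat ≠ j := by omega
        simp only [List.mem_cons, hjm, false_or, if_neg hmemL]
        simp [List.getD_eq_getElem?_getD, List.getElem?_set, hne]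

lemma foldl_pySetD_length (L : List Int) : ∀ (s : List Bool),
    (L.foldl (fun t m => PySem.List.pySetD t m false) s).length = s.length := by
  induction L with
  | nil => intro s; rfl
  | cons m L ih => intro s; simp [List.foldl_cons, ih, PySem.List.length_pySetD]

def SieveInv (n p : Int) (s : List Bool) : Prop :=
  s.length = n.toNat ∧ ∀ j : Nat, (j : Int) < n →
    (s.getD j false = false ↔ (j ≤ 1 ∨ ∃ q : Nat, 2 ≤ q ∧ (q : Int) < p ∧ q * q ≤ j ∧ q ∣ j))

lemma mark_inv (n p : Int) (h2p : 2 ≤ p) (hpn : p * p < n) (s : List Bool)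
    (hs : SieveInv n p s) : SieveInv n (p + 1) (pvBMark n p s) := by
  have hp4 : 4 ≤ p * p := by nlinarith
  refine ⟨by rw [pvBMark, foldl_pySetD_length]; exact hs.1, fun j hj => ?_⟩
  have hmem : ∀ m ∈ PySem.List.pyRange (p * p) n p, (0:Int) ≤ m := by
    intro m hm
    rw [PySem.List.mem_pyRange_iff_of_pos (by omega)] at hm
    omega
  rw [pvBMark, foldl_pySetD_getD _ _ _ hmem]
  simp only [PySem.List.mem_pyRange_iff_of_pos (show (0:Int) < p by omega)]
  by_cases hmark : p * p ≤ (j:Int) ∧ (j:Int) < n ∧ p ∣ (j:Int) - p * p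
  · rw [if_pos hmark]
    simp only [true_iff]
    right
    have hpj : p ∣ (j : Int) := by
      have hadd := dvd_add hmark.2.2 (dvd_mul_left p p)
      simpa using hadd
    refine ⟨p.toNat, by omega, by omega, ?_, ?_⟩
    · have : ((p.toNat : Int)) * ((p.toNat : Int)) ≤ (j : Int) := by
        rw [Int.toNat_of_nonneg (by omega : (0:Int) ≤ p)]; exact hmark.1
      exact_mod_cast this
    · have : ((p.toNat : Int)) ∣ (j : Int) := by
        rw [Int.toNat_of_nonneg (by omega : (0:Int) ≤ p)]; exact hpj
      exact_mod_cast this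
  · rw [if_neg hmark, hs.2 j hj]
    constructor
    · rintro (h1 | ⟨q, hq2, hqp, hqq, hqd⟩)
      · exact Or.inl h1
      · exact Or.inr ⟨q, hq2, by omega, hqq, hqd⟩
    · rintro (h1 | ⟨q, hq2, hqp, hqq, hqd⟩)
      · exact Or.inl h1
      · by_cases hlt : (q : Int) < p
        · exact Or.inr ⟨q, hq2, hlt, hqq, hqd⟩
        · exfalso
          have hqp' : (q : Int) = p := by omega
          apply hmark
          have hqqZ : (q : Int) * (q : Int) ≤ (j : Int) := by exact_mod_cast hqq
          have hqdZ : (q : Int) ∣ (j : Int) := by exact_mod_cast hqd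
          rw [hqp'] at hqqZ hqdZ
          exact ⟨hqqZ, hj, dvd_sub hqdZ (dvd_mul_left p p)⟩

lemma skip_inv (n p : Int) (h2p : 2 ≤ p) (hpn : p * p < n) (s : List Bool)
    (hs : SieveInv n p s) (hp : s.getD p.toNat false = false) : SieveInv n (p + 1) s := by
  have hppn : p < n := by nlinarith
  have hpn' : ((p.toNat : Int)) < n := by omega
  have hfac := (hs.2 p.toNat hpn').mp hp
  have hfac' : ∃ r : Nat, 2 ≤ r ∧ (r : Int) < p ∧ r * r ≤ p.toNat ∧ r ∣ p.toNat := by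
    rcases hfac with h1 | h
    · omega
    · exact h
  obtain ⟨r, hr2, hrp, hrr, hrd⟩ := hfac'
  clear hfac hp
  refine ⟨hs.1, fun j hj => ?_⟩
  rw [hs.2 j hj]
  constructor
  · rintro (h1 | ⟨q, hq2, hqp, hqq, hqd⟩)
    · exact Or.inl h1
    · exact Or.inr ⟨q, hq2, by omega, hqq, hqd⟩
  · rintro (h1 | ⟨q, hq2, hqp, hqq, hqd⟩)
    · exact Or.inl h1
    · by_cases hlt : (q : Int) < p
      · exact Or.inr ⟨q, hq2, hlt, hqq, hqd⟩
      · have hqpZ : (q : Int) = p := by omega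
        have hqp' : q = p.toNat := by omega
        subst hqp'
        refine Or.inr ⟨r, hr2, hrp, ?_, dvd_trans hrd hqd⟩
        calc r * r ≤ p.toNat := hrr
          _ ≤ p.toNat * p.toNat := Nat.le_mul_of_pos_left _ (by omega)
          _ ≤ j := hqq

lemma terminal_sieve (n p : Int) (s : List Bool) (h2p : 2 ≤ p) (hnp : ¬ p * p < n)
    (hs : SieveInv n p s) :
    ∀ j : Nat, (j : Int) < n → (s.getD j false = false ↔ (j ≤ 1 ∨ SmallFacN j)) := by
  intro j hj
  rw [hs.2 j hj]
  constructor
  · rintro (h1 | ⟨q, hq2, hqp, hqq, hqd⟩)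
    · exact Or.inl h1
    · exact Or.inr ⟨q, hq2, hqq, hqd⟩
  · rintro (h1 | ⟨q, hq2, hqq, hqd⟩)
    · exact Or.inl h1
    · refine Or.inr ⟨q, hq2, ?_, hqq, hqd⟩
      by_contra hge
      have hpq : p ≤ (q : Int) := by omega
      have hqqZ : (q : Int) * (q : Int) ≤ (j : Int) := by exact_mod_cast hqq
      nlinarith

lemma sieve_loop_final (n : Int) :
    ∀ (fuel : Nat) (p : Int) (s : List Bool), (n - p).toNat ≤ fuel → 2 ≤ p → SieveInv n p s →
    ∀ j : Nat, (j : Int) < n →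
      ((pvBSieveLoop n fuel p s).getD j false = false ↔ (j ≤ 1 ∨ SmallFacN j)) := by
  intro fuel
  induction fuel with
  | zero =>
    intro p s hf h2p hinv
    have hnp : ¬ p * p < n := by nlinarith [show n ≤ p by omega]
    simp only [pvBSieveLoop]
    exact terminal_sieve n p s h2p hnp hinv
  | succ f ih =>
    intro p s hf h2p hinv
    by_cases hpn : p * p < n
    · rw [pvBSieveLoop, if_pos hpn]
      have hstep : SieveInv n (p + 1)
          (if PySem.List.pyGetD s p false then pvBMark n p s else s) := by
        by_cases hgp : PySem.List.pyGetD s p false = true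
        · rw [if_pos hgp]
          exact mark_inv n p h2p hpn s hinv
        · rw [if_neg hgp]
          have hp' : s.getD p.toNat false = false := by
            rw [← pyGetD_nonneg_getD s p (by omega)]
            exact Bool.not_eq_true _ ▸ (Bool.eq_false_iff.mpr hgp)
          exact skip_inv n p h2p hpn s hinv hp'
      exact ih (p + 1) _ (by omega) (by omega) hstep
    · rw [pvBSieveLoop, if_neg hpn]
      exact terminal_sieve n p s h2p hpn hinv

lemma sieve_init (n : Int) (hn : 2 ≤ n) :
    SieveInv n 2 (PySem.List.pySetD (PySem.List.pySetD (List.replicate n.toNat true) 0 false) 1 false) := by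
  rw [PySem.List.pySetD_of_nonneg _ _ (by omega : (0:Int) ≤ 0),
      PySem.List.pySetD_of_nonneg _ _ (by omega : (0:Int) ≤ 1)]
  refine ⟨by simp, fun j hj => ?_⟩
  have hjlen : j < n.toNat := by omega
  have hnoq : ¬ ∃ q : Nat, 2 ≤ q ∧ (q : Int) < 2 ∧ q * q ≤ j ∧ q ∣ j := by
    rintro ⟨q, hq2, hqlt, -, -⟩; omega
  have h0len : 0 < n.toNat := by omega
  by_cases h0 : j = 0
  · subst h0
    simp [List.getD_eq_getElem?_getD, List.getElem?_set, h0len]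
  · by_cases h1 : j = 1
    · subst h1
      simp [List.getD_eq_getElem?_getD, List.getElem?_set, hjlen]
    · have e1 : (1:Nat) ≠ j := by omega
      have e0 : (0:Nat) ≠ j := by omega
      simp only [Int.toNat_one, Int.toNat_zero, List.getD_eq_getElem?_getD, List.getElem?_set,
        if_neg e1, if_neg e0, List.getElem?_replicate, if_pos hjlen, Option.getD_some]
      constructor
      · intro h; exact absurd h (by simp)
      · rintro (h | h)
        · omega
        · exact absurd h hnoq

lemma prime_point (num : Int) (hnum : 2 < num) (i : Int) (h2i : 2 ≤ i) (hin : i < num) :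
    PySem.List.pyGetD
      (pvBSieveLoop num num.toNat 2
        (PySem.List.pySetD (PySem.List.pySetD (List.replicate num.toNat true) 0 false) 1 false))
      i false = pvAIsPrime i := by
  have hicast : ((i.toNat : Int)) = i := Int.toNat_of_nonneg (by omega)
  have hfin := sieve_loop_final num num.toNat 2
      (PySem.List.pySetD (PySem.List.pySetD (List.replicate num.toNat true) 0 false) 1 false)
      (by omega) (by omega) (sieve_init num (by omega)) i.toNat (by omega)
  apply bool_ext
  rw [pyGetD_nonneg_getD _ _ (by omega : (0:Int) ≤ i)]
  rw [pvAIsPrime_iff i h2i]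
  rw [show ((pvBSieveLoop num num.toNat 2
      (PySem.List.pySetD (PySem.List.pySetD (List.replicate num.toNat true) 0 false) 1 false)).getD
        i.toNat false = true)
      ↔ ¬ ((pvBSieveLoop num num.toNat 2
      (PySem.List.pySetD (PySem.List.pySetD (List.replicate num.toNat true) 0 false) 1 false)).getD
        i.toNat false = false) from by
    constructor
    · intro h hc; rw [h] at hc; cases hc
    · intro h; cases hb : _root_.List.getD _ _ _
      · exact absurd hb h
      · rfl]
  rw [hfin]
  constructor
  · intro hnf hfac
    exact hnf (Or.inr ((smallfac_cast i.toNat).mp (hicast ▸ hfac)))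
  · rintro hnofac (h1 | hfac)
    · omega
    · exact hnofac (hicast ▸ (smallfac_cast i.toNat).mpr hfac)

-- ---- Fibonacci ----

lemma pvAFibLoop_fib (n : Int) :
    ∀ (fuel k : Nat), (n - (Nat.fib (k + 3) : Int)).toNat ≤ fuel →
    (∀ j, 3 ≤ j → j < k + 3 → (Nat.fib j : Int) ≠ n) →
    (pvAFibLoop n fuel (Nat.fib (k + 2)) (Nat.fib (k + 3)) = true ↔
      ∃ j, 3 ≤ j ∧ (Nat.fib j : Int) = n) := by
  intro fuel
  induction fuel with
  | zero =>
    intro k hf hold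
    simp only [pvAFibLoop, beq_iff_eq]
    constructor
    · intro he; exact ⟨k + 3, by omega, he⟩
    · rintro ⟨j, hj3, hje⟩
      by_cases hjlt : j < k + 3
      · exact absurd hje (hold j hj3 hjlt)
      · have : Nat.fib (k + 3) ≤ Nat.fib j := Nat.fib_mono (by omega)
        have : (Nat.fib (k + 3) : Int) ≤ (Nat.fib j : Int) := by exact_mod_cast this
        omega
  | succ f ih =>
    intro k hf hold
    rw [pvAFibLoop]
    by_cases hlt : ((Nat.fib (k + 3) : Int) < n)
    · rw [if_pos hlt]
      have hadd : Nat.fib (k + 2) + Nat.fib (k + 3) = Nat.fib (k + 4) := (Nat.fib_add_two (n := k + 2)).symm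
      rw [hadd]
      apply ih (k + 1)
      · show (n - (Nat.fib (k + 4) : Int)).toNat ≤ f
        have hmono : Nat.fib (k + 3) < Nat.fib (k + 4) := Nat.fib_lt_fib_succ (by omega)
        have : (Nat.fib (k + 3) : Int) < (Nat.fib (k + 4) : Int) := by exact_mod_cast hmono
        omega
      · intro j hj3 hjlt
        by_cases hjk : j < k + 3
        · exact hold j hj3 hjk
        · have hjeq : j = k + 3 := by omega
          subst hjeq
          omega
    · rw [if_neg hlt]
      simp only [beq_iff_eq]
      constructor
      · intro he; exact ⟨k + 3, by omega, he⟩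
      · rintro ⟨j, hj3, hje⟩
        by_cases hjlt : j < k + 3
        · exact absurd hje (hold j hj3 hjlt)
        · have : Nat.fib (k + 3) ≤ Nat.fib j := Nat.fib_mono (by omega)
          have : (Nat.fib (k + 3) : Int) ≤ (Nat.fib j : Int) := by exact_mod_cast this
          omega

lemma pvAIsFib_iff (n : Int) (hn : 2 ≤ n) :
    (pvAIsFib n = true ↔ ∃ j, 3 ≤ j ∧ (Nat.fib j : Int) = n) := by
  have h1n : ((1:Nat) : Int) < n := by exact_mod_cast (by omega : (1:Int) < n)
  unfold pvAIsFib
  rw [pvAFibLoop, if_pos h1n, Nat.zero_add, pvAFibLoop, if_pos h1n]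
  exact pvAFibLoop_fib n n.toNat 0
    (by show (n - (2:Int)).toNat ≤ n.toNat; omega)
    (by intro j hj3 hjlt; omega)

lemma pvBFibLoop_mem (num x : Int) :
    ∀ (fuel k : Nat) (acc : PySem.Set Int),
    (num - (Nat.fib (k + 3) : Int)).toNat ≤ fuel →
    (x ∈ pvBFibLoop num fuel acc (Nat.fib (k + 3)) (Nat.fib (k + 4)) ↔
      x ∈ acc ∨ ∃ j, k + 3 ≤ j ∧ (Nat.fib j : Int) = x ∧ x < num) := by
  intro fuel
  induction fuel with
  | zero =>
    intro k acc hf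
    simp only [pvBFibLoop]
    constructor
    · exact Or.inl
    · rintro (hacc | ⟨j, hj, hje, hxlt⟩)
      · exact hacc
      · exfalso
        have : Nat.fib (k + 3) ≤ Nat.fib j := Nat.fib_mono (by omega)
        have : (Nat.fib (k + 3) : Int) ≤ (Nat.fib j : Int) := by exact_mod_cast this
        omega
  | succ f ih =>
    intro k acc hf
    rw [pvBFibLoop]
    by_cases hlt : ((Nat.fib (k + 3) : Int) < num)
    · rw [if_pos hlt]
      have hadd : Nat.fib (k + 3) + Nat.fib (k + 4) = Nat.fib (k + 5) := (Nat.fib_add_two (n := k + 3)).symm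
      rw [hadd]
      rw [ih (k + 1) _ (by
        show (num - (Nat.fib (k + 4) : Int)).toNat ≤ f
        have hmono : Nat.fib (k + 3) < Nat.fib (k + 4) := Nat.fib_lt_fib_succ (by omega)
        have : (Nat.fib (k + 3) : Int) < (Nat.fib (k + 4) : Int) := by exact_mod_cast hmono
        omega)]
      rw [PySem.Set.mem_add]
      constructor
      · rintro ((hacc | hx) | ⟨j, hj, hje, hxlt⟩)
        · exact Or.inl hacc
        · exact Or.inr ⟨k + 3, le_refl _, hx.symm, hx ▸ hlt⟩
        · exact Or.inr ⟨j, by omega, hje, hxlt⟩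
      · rintro (hacc | ⟨j, hj, hje, hxlt⟩)
        · exact Or.inl (Or.inl hacc)
        · by_cases hjk : j = k + 3
          · subst hjk; exact Or.inl (Or.inr hje.symm)
          · exact Or.inr ⟨j, by omega, hje, hxlt⟩
    · rw [if_neg hlt]
      constructor
      · exact Or.inl
      · rintro (hacc | ⟨j, hj, hje, hxlt⟩)
        · exact hacc
        · exfalso
          have : Nat.fib (k + 3) ≤ Nat.fib j := Nat.fib_mono (by omega)
          have : (Nat.fib (k + 3) : Int) ≤ (Nat.fib j : Int) := by exact_mod_cast this
          omega

lemma fib_point (num i : Int) (h2 : 2 ≤ i) (hlt : i < num) :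
    PySem.Set.contains (pvBFibLoop num (num.toNat + 1) PySem.Set.empty 2 3) i = pvAIsFib i := by
  apply bool_ext
  rw [PySem.Set.contains_iff]
  rw [show pvBFibLoop num (num.toNat + 1) PySem.Set.empty 2 3
        = pvBFibLoop num (num.toNat + 1) PySem.Set.empty (Nat.fib 3) (Nat.fib 4) from rfl]
  rw [pvBFibLoop_mem num i (num.toNat + 1) 0 _
      (by show (num - (2:Int)).toNat ≤ num.toNat + 1; omega)]
  rw [pvAIsFib_iff i h2]
  constructor
  · rintro (habs | ⟨j, hj, hje, -⟩)
    · exact absurd habs (by simp [PySem.Set.empty])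
    · exact ⟨j, hj, hje⟩
  · rintro ⟨j, hj, hje⟩
    exact Or.inr ⟨j, hj, hje, by omega⟩

-- ---- fold shapes ----

lemma foldA_shape (P F : Int → Bool) (l : List Int) : ∀ (ps fs : List Int),
    (l.foldl
      (fun (s : List Int × List Int) i =>
        if P i then (s.1 ++ [i], if F i then s.2 ++ [i] else s.2) else s) (ps, fs))
      = (ps ++ l.filter P, fs ++ l.filter (fun i => P i && F i)) := by
  induction l with
  | nil => intro ps fs; simp
  | cons a l ih =>
    intro ps fs
    simp only [List.foldl_cons, List.filter_cons]
    by_cases hp : P a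
    · by_cases hf : F a <;> (simp [hp, hf, ih]; try exact ⟨trivial, trivial⟩)
    · simp [hp, ih]

lemma foldB_shape (P F : Int → Bool) (l : List Int) : ∀ (s1 s2 : Int),
    (l.foldl
      (fun (s : Int × Int) i =>
        if P i then (s.1 + i, if F i then s.2 + i else s.2) else s) (s1, s2))
      = (s1 + (l.filter P).sum, s2 + (l.filter (fun i => P i && F i)).sum) := by
  induction l with
  | nil => intro s1 s2; simp
  | cons a l ih =>
    intro s1 s2
    simp only [List.foldl_cons, List.filter_cons]
    by_cases hp : P a
    · by_cases hf : F a <;> (simp [hp, hf, ih, add_assoc]; try exact ⟨trivial, trivial⟩)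
    · simp [hp, ih]

-- ===== VERDICT (by name: the statement is the Claim_ definition above) =====
theorem calc_aggregate_spec : Claim_equal_calc_aggregate := by
  intro num _dom
  unfold Spec_calc_aggregate
  by_cases hnum : 2 < num
  · simp only [calc_aggregate, calc_aggregate_alt, if_pos (show num > 2 from hnum)]
    rw [foldA_shape, foldB_shape]
    have hP : ∀ i ∈ PySem.List.pyRange 2 num 1,
        (PySem.List.pyGetD
          (pvBSieveLoop num num.toNat 2
            (PySem.List.pySetD (PySem.List.pySetD (List.replicate num.toNat true) 0 false) 1 false))
          i false) = pvAIsPrime i := by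
      intro i hi
      rw [PySem.List.mem_pyRange_one] at hi
      exact prime_point num hnum i hi.1 hi.2
    have hF : ∀ i ∈ PySem.List.pyRange 2 num 1,
        PySem.Set.contains (pvBFibLoop num (num.toNat + 1) PySem.Set.empty 2 3) i = pvAIsFib i := by
      intro i hi
      rw [PySem.List.mem_pyRange_one] at hi
      exact fib_point num i hi.1 hi.2
    rw [List.filter_congr hP,
        List.filter_congr (fun i hi => by rw [hP i hi, hF i hi] :
          ∀ i ∈ PySem.List.pyRange 2 num 1,
            (PySem.List.pyGetD
              (pvBSieveLoop num num.toNat 2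
                (PySem.List.pySetD (PySem.List.pySetD (List.replicate num.toNat true) 0 false) 1 false))
              i false
            && PySem.Set.contains (pvBFibLoop num (num.toNat + 1) PySem.Set.empty 2 3) i)
            = (pvAIsPrime i && pvAIsFib i))]
    simp
  · have hnil : PySem.List.pyRange 2 num 1 = [] := PySem.List.pyRange_one_eq_nil (by omega)
    simp only [calc_aggregate, calc_aggregate_alt, hnil]
    rfl
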